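-- pv_equiv track=rewrite | github.com/Kensan196948G/backup-management-system | app/services/offline_media_detector.py | _extract_media_id
-- ===== SOURCE A (Python) =====
-- from typing import Dict, List, Optional
--
-- def _extract_media_id(storage_path: str) -> Optional[str]:
--     """
--     Extract media identifier from storage path.
--
--     Args:
--         storage_path: Storage path string
--
--     Returns:
--         Media ID or None
--     """
--     if not storage_path:
--         return None
--
--     # Common patterns for media identifiers
--     # Examples:
--     # - "\\\\nas\\tape001\\backup.tar"
--     # - "/mnt/external/USB-001/data"
--     # - "E:\\Backup\\Media-A01"
--
--     parts = storage_path.replace("\\", "/").split("/")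
--
--     # Look for parts with identifiable patterns
--     for part in parts:
--         # Check for tape identifiers
--         if "tape" in part.lower() and any(c.isdigit() for c in part):
--             return part
--
--         # Check for USB identifiers
--         if "usb" in part.lower() and any(c.isdigit() for c in part):
--             return part
--
--         # Check for media identifiers
--         if "media" in part.lower() and any(c.isdigit() for c in part):
--             return part
--
--         # Check for drive letters
--         if len(part) == 2 and part[1] == ":" and part[0].isalpha():
--             return f"Drive-{part[0]}"
--
--     # Fallback: use the first meaningful directory name
--     for part in parts:
--         if part and part not in [".", "..", ""]:
--             return part[:50]  # Limit length
--
--     return None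
-- ===== SOURCE B (Python) =====
-- from typing import Optional
--
-- def _extract_media_id(storage_path: str) -> Optional[str]:
--     """Single pass: pattern hits return immediately; the first meaningful
--     part is remembered (truncated to 50) as the fallback."""
--     if not storage_path:
--         return None
--
--     fallback = None
--     for part in storage_path.replace("\\", "/").split("/"):
--         low = part.lower()
--         if ("tape" in low or "usb" in low or "media" in low) and any(
--             c.isdigit() for c in part
--         ):
--             return part
--         if len(part) == 2 and part[1] == ":" and part[0].isalpha():
--             return f"Drive-{part[0]}"
--         if fallback is None and part not in ("", ".", ".."):
--             fallback = part[:50]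
--     return fallback
-- ===== Notes on version B (the rewrite author's own statement) =====
-- stated objective: simpler
-- what changed: Replaces A's two sequential scans of the parts (pattern scan, then fallback scan) by one pass that returns pattern/drive hits immediately and carries the first meaningful part as a fallback accumulator, merging the three keyword checks into one condition.
import Mathlib
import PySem

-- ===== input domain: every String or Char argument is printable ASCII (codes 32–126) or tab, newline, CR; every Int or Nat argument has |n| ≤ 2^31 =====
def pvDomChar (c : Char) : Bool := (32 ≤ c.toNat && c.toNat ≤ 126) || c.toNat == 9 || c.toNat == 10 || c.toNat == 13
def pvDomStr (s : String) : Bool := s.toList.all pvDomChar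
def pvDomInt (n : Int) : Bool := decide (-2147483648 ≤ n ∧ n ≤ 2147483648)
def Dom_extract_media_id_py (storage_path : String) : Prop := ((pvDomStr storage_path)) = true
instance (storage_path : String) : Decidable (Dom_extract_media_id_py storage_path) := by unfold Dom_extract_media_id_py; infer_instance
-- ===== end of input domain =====

-- B fuses A's two scans into one pass carrying the first meaningful part as a fallback; return value equivalence, no side effects.

-- ===== PORT A =====
-- first loop of A: pattern / drive-letter scan, returns on the first hit
def pvALoop : List String → Option String
  | [] => none
  | part :: rest =>
    if PySem.Str.isIn "tape" (PySem.Str.lower part) && part.toList.any PySem.Chars.isdigit then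
      some part
    else if PySem.Str.isIn "usb" (PySem.Str.lower part) && part.toList.any PySem.Chars.isdigit then
      some part
    else if PySem.Str.isIn "media" (PySem.Str.lower part) && part.toList.any PySem.Chars.isdigit then
      some part
    else
      match part.toList with
      | [c0, c1] =>
        if c1 == ':' && PySem.Chars.isalpha c0 then some ("Drive-" ++ String.ofList [c0])
        else pvALoop rest
      | _ => pvALoop rest

-- second loop of A: first meaningful part, truncated to 50
def pvAFallback : List String → Option String
  | [] => none
  | part :: rest =>
    if !(part == "") && !(part == "." || part == ".." || part == "") then
      some (PySem.Str.slice part none (some 50))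
    else pvAFallback rest

def extract_media_id_py (storage_path : String) : Option String :=
  if storage_path == "" then none
  else
    let parts := (PySem.Str.split? (PySem.Str.replace storage_path "\\" "/") "/").getD []
    match pvALoop parts with
    | some r => some r
    | none => pvAFallback parts

-- ===== PORT B =====
-- single pass with a fallback accumulator (Source B's loop)
def pvBLoop : List String → Option String → Option String
  | [], fallback => fallback
  | part :: rest, fallback =>
    let low := PySem.Str.lower part
    if (PySem.Str.isIn "tape" low || PySem.Str.isIn "usb" low || PySem.Str.isIn "media" low)
        && part.toList.any PySem.Chars.isdigit then
      some part
    else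
      match part.toList with
      | [c0, c1] =>
        if c1 == ':' && PySem.Chars.isalpha c0 then some ("Drive-" ++ String.ofList [c0])
        else pvBLoop rest (if fallback.isNone && !(part == "" || part == "." || part == "..") then
            some (PySem.Str.slice part none (some 50)) else fallback)
      | _ => pvBLoop rest (if fallback.isNone && !(part == "" || part == "." || part == "..") then
            some (PySem.Str.slice part none (some 50)) else fallback)

def extract_media_id_py_alt (storage_path : String) : Option String :=
  if storage_path == "" then none
  else
    pvBLoop ((PySem.Str.split? (PySem.Str.replace storage_path "\\" "/") "/").getD []) none

-- ===== PRECONDITION & SPEC =====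
def Spec_extract_media_id_py (storage_path : String) (out : Option String) : Prop := out = extract_media_id_py_alt storage_path
instance (storage_path : String) (out : Option String) : Decidable (Spec_extract_media_id_py storage_path out) := by unfold Spec_extract_media_id_py; infer_instance

-- ===== CLAIM (what is proved, stated in full; the proofs are below) =====
def Claim_equal_extract_media_id_py : Prop := ∀ (storage_path : String), Dom_extract_media_id_py storage_path → Spec_extract_media_id_py storage_path (extract_media_id_py storage_path)

-- ===== LEMMAS AND PROOFS =====

-- B's fused loop equals A's pattern scan, falling back to the accumulator, then A's fallback scan
lemma pvBLoop_eq (parts : List String) (fb : Option String) :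
    pvBLoop parts fb = (pvALoop parts).or (fb.or (pvAFallback parts)) := by
  induction parts generalizing fb with
  | nil => cases fb <;> rfl
  | cons part rest ih =>
    simp only [pvBLoop, pvALoop, pvAFallback]
    cases ht : PySem.Str.isIn "tape" (PySem.Str.lower part) <;>
    cases hu : PySem.Str.isIn "usb" (PySem.Str.lower part) <;>
    cases hm : PySem.Str.isIn "media" (PySem.Str.lower part) <;>
    cases hd : part.toList.any PySem.Chars.isdigit <;>
    first
    | rfl
    | (cases hl : part.toList with
       | nil =>
         rw [ih]
         cases pvALoop rest <;> cases fb <;> cases h0 : part == "" <;> cases h1 : part == "." <;>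
           cases h2 : part == ".." <;> simp [Option.or, h0, h1, h2]
       | cons c0 tl =>
         cases tl with
         | nil =>
           rw [ih]
           cases pvALoop rest <;> cases fb <;> cases h0 : part == "" <;> cases h1 : part == "." <;>
             cases h2 : part == ".." <;> simp [Option.or, h0, h1, h2]
         | cons c1 tl2 =>
           cases tl2 with
           | cons c2 tl3 =>
             rw [ih]
             cases pvALoop rest <;> cases fb <;> cases h0 : part == "" <;> cases h1 : part == "." <;>
               cases h2 : part == ".." <;> simp [Option.or, h0, h1, h2]
           | nil =>
             cases hdr : (c1 == ':' && PySem.Chars.isalpha c0)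
             · simp only [hdr, Bool.false_eq_true, if_false]
               rw [ih]
               cases pvALoop rest <;> cases fb <;> cases h0 : part == "" <;> cases h1 : part == "." <;>
                 cases h2 : part == ".." <;> simp [Option.or, h0, h1, h2]
             · simp only [hdr, if_true]
               cases fb <;> rfl)

-- ===== VERDICT (by name: the statement is the Claim_ definition above) =====
theorem extract_media_id_py_spec : Claim_equal_extract_media_id_py := by
  intro s _
  unfold Spec_extract_media_id_py extract_media_id_py extract_media_id_py_alt
  by_cases h : s = ""
  · simp [h]
  · rw [if_neg (by simpa using h), if_neg (by simpa using h), pvBLoop_eq]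
    cases hA : pvALoop ((PySem.Str.split? (PySem.Str.replace s "\\" "/") "/").getD []) <;>
      simp [hA, Option.or]
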